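-- pv_equiv track=rewrite | github.com/eldorPulatov/Python | Конкурс Simbir/index.py | takeBase64
-- ===== SOURCE A (Python) =====
-- def takeBase64(str):
--     b = ""
--     isOk = 0
--     for i in str:
--         if i == ' ':
--             isOk = 1
--             continue
--         if isOk == 1:
--             b = b + i
--
--     return b
-- ===== SOURCE B (Python) =====
-- def takeBase64(str):
--     idx = str.find(' ')
--     if idx == -1:
--         return ""
--     return ''.join(c for c in str[idx+1:] if c != ' ')
-- ===== Notes on version B (the rewrite author's own statement) =====
-- stated objective: simpler
-- what changed: Replaces the stateful per-character loop with an isOk flag and manual concatenation by a find-the-first-space, slice-the-tail, filter-out-spaces decomposition.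
import Mathlib
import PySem

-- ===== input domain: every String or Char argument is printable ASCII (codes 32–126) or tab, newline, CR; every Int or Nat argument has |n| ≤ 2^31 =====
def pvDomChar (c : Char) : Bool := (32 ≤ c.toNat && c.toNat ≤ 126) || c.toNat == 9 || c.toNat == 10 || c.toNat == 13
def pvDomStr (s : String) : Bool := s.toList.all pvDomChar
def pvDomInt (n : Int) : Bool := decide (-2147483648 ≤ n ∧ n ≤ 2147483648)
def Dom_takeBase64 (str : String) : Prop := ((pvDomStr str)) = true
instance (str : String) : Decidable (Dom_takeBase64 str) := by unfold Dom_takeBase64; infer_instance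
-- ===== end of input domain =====

-- B replaces A's stateful flag loop by find-first-space / slice / filter; return value only, no mutation.

-- ===== PORT A =====
-- the loop state is (b, isOk); b kept as List Char, turned into a String on return
def takeBase64 (str : String) : String :=
  let r := str.toList.foldl
    (fun (s : List Char × Int) i =>
      if i = ' ' then (s.1, 1)
      else if s.2 = 1 then (s.1 ++ [i], s.2) else s)
    ([], 0)
  String.ofList r.1

-- ===== PORT B =====
def takeBase64_alt (str : String) : String :=
  let idx := PySem.Str.find str " "
  if idx = -1 then ""
  else String.ofList ((PySem.Str.slice str (some (idx + 1)) none).toList.filter (fun c => c ≠ ' '))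

-- ===== PRECONDITION & SPEC =====
def Spec_takeBase64 (str : String) (out : String) : Prop := out = takeBase64_alt str
instance (str : String) (out : String) : Decidable (Spec_takeBase64 str out) := by unfold Spec_takeBase64; infer_instance

-- ===== CLAIM (what is proved, stated in full; the proofs are below) =====
def Claim_equal_takeBase64 : Prop := ∀ (str : String), Dom_takeBase64 str → Spec_takeBase64 str (takeBase64 str)

-- ===== LEMMAS AND PROOFS =====

-- A's loop step
def pvStep (s : List Char × Int) (i : Char) : List Char × Int :=
  if i = ' ' then (s.1, 1)
  else if s.2 = 1 then (s.1 ++ [i], s.2) else s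

set_option maxHeartbeats 1000000 in
theorem takeBase64_eq_fold (str : String) :
    takeBase64 str = String.ofList (str.toList.foldl pvStep ([], 0)).1 := rfl

-- once the flag is set, the loop appends exactly the non-space characters
theorem fold_flag_on (t : List Char) (b : List Char) :
    t.foldl pvStep (b, 1) = (b ++ t.filter (fun c => c ≠ ' '), 1) := by
  induction t generalizing b with
  | nil => simp
  | cons c t ih =>
    by_cases hc : c = ' ' <;> simp [pvStep, hc, ih]

-- before any space is seen the state is unchanged
theorem fold_flag_off (p : List Char) (b : List Char) (hp : ' ' ∉ p) :
    p.foldl pvStep (b, 0) = (b, 0) := by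
  induction p with
  | nil => simp
  | cons c t ih =>
    have hc : c ≠ ' ' := fun h => hp (h ▸ List.mem_cons_self)
    simp only [List.foldl_cons, pvStep, hc, if_false]
    norm_num
    exact ih (fun h => hp (List.mem_cons_of_mem _ h))

theorem fold_main (p t : List Char) (hp : ' ' ∉ p) :
    (p ++ ' ' :: t).foldl pvStep ([], 0) = (t.filter (fun c => c ≠ ' '), 1) := by
  rw [List.foldl_append, fold_flag_off p [] hp]
  simp only [List.foldl_cons, pvStep]
  simpa using fold_flag_on t []

theorem singleton_infix (a : Char) (l : List Char) : [a] <:+: l ↔ a ∈ l := by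
  constructor
  · rintro ⟨s, t, rfl⟩; simp
  · intro h
    obtain ⟨s, t, rfl⟩ := List.append_of_mem h
    exact ⟨s, t, by simp⟩

theorem find_first_space (p t : List Char) (hp : ' ' ∉ p) :
    PySem.Chars.find (p ++ ' ' :: t) [' '] = (p.length : Int) := by
  set l := p ++ ' ' :: t with hl
  have hinf : [' '] <:+: l := ⟨p, t, by simp [hl]⟩
  have hpos : 0 ≤ PySem.Chars.find l [' '] :=
    (PySem.Chars.find_nonneg_iff l [' ']).mpr hinf
  obtain ⟨hpre, hmin⟩ := PySem.Chars.find_spec hpos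
  rw [(Int.toNat_of_nonneg hpos).symm]
  generalize hk : (PySem.Chars.find l [' ']).toNat = k at hpre hmin ⊢
  have hdropP : l.drop p.length = ' ' :: t := by simp [hl]
  have hle : k ≤ p.length := by
    by_contra h
    exact hmin p.length (by omega) (by rw [hdropP]; exact ⟨t, rfl⟩)
  rcases Nat.lt_or_ge k p.length with h | h
  · exfalso
    obtain ⟨r, hr⟩ := hpre
    have hhead : l[k]? = some ' ' := by rw [← List.head?_drop, ← hr]; rfl
    have h2 : l[k]? = some p[k] := by
      conv_lhs => rw [hl]
      rw [List.getElem?_append_left (by omega)]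
      exact List.getElem?_eq_getElem h
    have hpk : p[k] = ' ' := Option.some.inj (h2.symm.trans hhead)
    exact hp (hpk ▸ p.getElem_mem h)
  · omega

theorem first_space_decomp (l : List Char) (h : ' ' ∈ l) :
    ∃ p t, l = p ++ ' ' :: t ∧ ' ' ∉ p := by
  induction l with
  | nil => cases h
  | cons c r ih =>
    by_cases hc : c = ' '
    · exact ⟨[], r, by simp [hc], by simp⟩
    · obtain ⟨p, t, rfl, hp⟩ := ih (by
        rcases List.mem_cons.mp h with h1 | h2
        · exact absurd h1.symm hc
        · exact h2)
      exact ⟨c :: p, t, rfl, by simp [hp]; exact fun h => hc h.symm⟩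

set_option maxHeartbeats 1000000 in
theorem alt_with_space (str : String) (p t : List Char) (hl : str.toList = p ++ ' ' :: t) (hp : ' ' ∉ p) :
    takeBase64_alt str = String.ofList (t.filter (fun c => c ≠ ' ')) := by
  have hfind : PySem.Str.find str " " = (p.length : Int) := by
    rw [PySem.Str.find_eq]
    simpa [hl] using find_first_space p t hp
  unfold takeBase64_alt
  simp only [hfind]
  rw [if_neg (by omega : ¬ ((p.length : Int) = -1))]
  congr 1
  rw [PySem.Str.toList_slice]
  have h1 : ((p.length : Int) + 1) = ((p.length + 1 : Nat) : Int) := by push_cast; ring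
  rw [h1]
  simp only [PySem.Chars.slice_eq_listSlice, PySem.List.slice_from_natCast, hl]
  have hd : ∀ (q : List Char), List.drop (q.length + 1) (q ++ ' ' :: t) = t := by
    intro q
    induction q with
    | nil => rfl
    | cons c r ih => simp [ih]
  rw [hd p]

set_option maxHeartbeats 1000000 in
theorem a_with_space (str : String) (p t : List Char) (hl : str.toList = p ++ ' ' :: t) (hp : ' ' ∉ p) :
    takeBase64 str = String.ofList (t.filter (fun c => c ≠ ' ')) := by
  rw [takeBase64_eq_fold, hl, fold_main p t hp]

set_option maxHeartbeats 1000000 in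
theorem alt_no_space (str : String) (h : ' ' ∉ str.toList) : takeBase64_alt str = "" := by
  have hfind : PySem.Chars.find str.toList [' '] = -1 :=
    (PySem.Chars.find_eq_neg_one_iff _ _).mpr
      (fun hinf => h ((singleton_infix _ _).mp (by simpa using hinf)))
  unfold takeBase64_alt
  simp [hfind]

set_option maxHeartbeats 1000000 in
theorem a_no_space (str : String) (h : ' ' ∉ str.toList) : takeBase64 str = "" := by
  rw [takeBase64_eq_fold, fold_flag_off _ _ h]

-- ===== VERDICT (by name: the statement is the Claim_ definition above) =====
theorem takeBase64_spec : Claim_equal_takeBase64 := by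
  intro str _
  unfold Spec_takeBase64
  by_cases h : ' ' ∈ str.toList
  · obtain ⟨p, t, hl, hp⟩ := first_space_decomp _ h
    rw [a_with_space str p t hl hp, alt_with_space str p t hl hp]
  · rw [a_no_space str h, alt_no_space str h]
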